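-- pv_equiv track=rewrite | github.com/raeez/chiral-bar-cobar | compute/lib/bar_cohomology_dimensions.py | _sl2_modes_at_weight
-- ===== SOURCE A (Python) =====
-- from typing import Dict, List, Optional, Tuple, Any
--
-- def _sl2_modes_at_weight(h: int) -> List[Tuple[Tuple[int, int], ...]]:
--     """PBW basis states of affine sl_2 at weight h.
--
--     Generators: e (index 0), h_cartan (index 1), f (index 2), all weight 1.
--     Modes: X^a_{-n} for a in {0,1,2}, n >= 1, with weight n.
--     States: ordered products X^{a_1}_{-n_1} ... X^{a_r}_{-n_r} |0>
--     with (a_1, n_1) >= (a_2, n_2) >= ... (lexicographic on (n, a) descending)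
--     and sum of n_i = h.
--
--     Each state is encoded as a tuple of (generator_index, mode_level) pairs,
--     sorted in PBW order.
--     """
--     # Generate all multisets of (gen_idx, level) with total level = h
--     # gen_idx in {0,1,2}, level >= 1
--     # PBW order: sort by (level DESC, gen_idx DESC)
--
--     def _gen_states(remaining_weight, max_pair, num_left):
--         """Generate states as sorted tuples of (gen_idx, level) pairs.
--
--         max_pair: maximum allowed (level, gen_idx) for PBW ordering.
--         """
--         if remaining_weight == 0:
--             yield ()
--             return
--         if num_left is not None and num_left == 0:
--             return
--         for level in range(min(remaining_weight, max_pair[0] if max_pair else remaining_weight), 0, -1):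
--             max_gen = max_pair[1] if (max_pair and level == max_pair[0]) else 2
--             for gen_idx in range(max_gen, -1, -1):
--                 pair = (gen_idx, level)
--                 new_max = (level, gen_idx)
--                 for rest in _gen_states(remaining_weight - level, new_max, None):
--                     yield (pair,) + rest
--
--     return list(_gen_states(h, (h, 2), None))
-- ===== SOURCE B (Python) =====
-- from typing import List, Tuple
--
-- def _sl2_modes_at_weight(h: int) -> List[Tuple[Tuple[int, int], ...]]:
--     """PBW basis states of affine sl_2 at weight h.
--
--     Staged scheme: first enumerate the integer partitions of h (the level
--     multisets), then decorate each partition with all admissible generator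
--     colorings (non-increasing where levels tie), and finally sort all states
--     by their (level, gen_idx) key sequence in descending order.
--     """
--     states = [s for part in _partitions(h, h) for s in _colorize(part, 0, 2)]
--     states.sort(key=lambda s: [c for (g, l) in s for c in (l, g)], reverse=True)
--     return states
--
-- def _partitions(n, maxp):
--     """Weakly decreasing lists of parts in 1..maxp summing to n."""
--     if n == 0:
--         return [[]]
--     return [[p] + rest
--             for p in range(min(n, maxp), 0, -1)
--             for rest in _partitions(n - p, p)]
--
-- def _colorize(levels, prev_l, prev_g):
--     """All generator decorations of a partition, as (gen, level) tuples."""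
--     if not levels:
--         return [()]
--     l = levels[0]
--     gmax = prev_g if l == prev_l else 2
--     return [((g, l),) + rest
--             for g in range(gmax, -1, -1)
--             for rest in _colorize(levels[1:], l, g)]
-- ===== Notes on version B (the rewrite author's own statement) =====
-- stated objective: alternative
-- what changed: A emits states in PBW order by one recursion whose nested level/generator loops carry a (level, gen) bound; B stages the work: it enumerates the integer partitions of h, decorates each partition with every admissible generator coloring, and sorts the collected states by their (level, gen) key sequence in descending order at the end.
import Mathlib
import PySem

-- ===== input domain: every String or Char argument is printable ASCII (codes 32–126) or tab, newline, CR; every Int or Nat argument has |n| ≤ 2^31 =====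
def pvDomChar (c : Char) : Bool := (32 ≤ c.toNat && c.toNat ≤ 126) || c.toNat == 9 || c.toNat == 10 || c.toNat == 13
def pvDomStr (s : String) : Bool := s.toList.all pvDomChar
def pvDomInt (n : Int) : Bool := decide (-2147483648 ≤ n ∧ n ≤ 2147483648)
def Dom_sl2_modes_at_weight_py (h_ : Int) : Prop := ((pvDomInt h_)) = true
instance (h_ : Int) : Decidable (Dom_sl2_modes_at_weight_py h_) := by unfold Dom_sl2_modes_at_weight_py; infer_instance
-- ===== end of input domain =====

-- B enumerates the integer partitions of h first, decorates each with all
-- admissible generator colorings, and sorts the collected states at the end,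
-- instead of A's single recursion that emits states directly in PBW order
-- (objective: alternative, same asymptotic cost).

-- ===== PORT A =====
-- In every call of A's `_gen_states`, `max_pair` is a (truthy) 2-tuple and
-- `num_left` is None, so `max_pair` is ported as two Ints and the dead
-- `num_left == 0` branch is dropped; `.attach` only carries the membership
-- fact needed for termination.
def pvGenStates (rem maxL maxG : Int) : List (List (Int × Int)) :=
  if rem = 0 then [[]]
  else
    ((PySem.List.pyRange (min rem maxL) 0 (-1)).attach.map
      (fun lv =>
        (PySem.List.pyRange (if lv.1 = maxL then maxG else 2) (-1) (-1)).flatMap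
          (fun gen => (pvGenStates (rem - lv.1) lv.1 gen).map
            (fun rest => (gen, lv.1) :: rest)))).flatten
termination_by rem.toNat
decreasing_by
  have h1 := PySem.List.mem_pyRange_neg_one.mp lv.2
  have h2 : min rem maxL ≤ rem := min_le_left _ _
  omega

def sl2_modes_at_weight_py (h_ : Int) : List (List (Int × Int)) :=
  pvGenStates h_ h_ 2

-- ===== PORT B =====
-- `_partitions(n, maxp)`: weakly decreasing lists of parts in 1..maxp summing
-- to n; `.attach` only carries the membership fact needed for termination.
def pvPartitionsB (n maxp : Int) : List (List Int) :=
  if n = 0 then [[]]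
  else
    (PySem.List.pyRange (min n maxp) 0 (-1)).attach.flatMap
      (fun p => (pvPartitionsB (n - p.1) p.1).map (fun rest => p.1 :: rest))
termination_by n.toNat
decreasing_by
  have h1 := PySem.List.mem_pyRange_neg_one.mp p.2
  have h2 : min n maxp ≤ n := min_le_left _ _
  omega

-- `_colorize(levels, prev_l, prev_g)`: structural recursion on the level list.
def pvColorize : List Int → Int → Int → List (List (Int × Int))
  | [], _, _ => [[]]
  | l :: rest, prev_l, prev_g =>
      (PySem.List.pyRange (if l = prev_l then prev_g else 2) (-1) (-1)).flatMap
        (fun g => (pvColorize rest l g).map (fun r => (g, l) :: r))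

-- the sort key [c for (g, l) in s for c in (l, g)]
def pvKeyB (s : List (Int × Int)) : List Int := s.flatMap (fun p => [p.2, p.1])

def sl2_modes_at_weight_py_alt (h_ : Int) : List (List (Int × Int)) :=
  PySem.List.sorted
    ((pvPartitionsB h_ h_).flatMap (fun part => pvColorize part 0 2))
    pvKeyB true

-- ===== PRECONDITION & SPEC =====
def Spec_sl2_modes_at_weight_py (h_ : Int) (out : List (List (Int × Int))) : Prop := out = sl2_modes_at_weight_py_alt h_
instance (h_ : Int) (out : List (List (Int × Int))) : Decidable (Spec_sl2_modes_at_weight_py h_ out) := by unfold Spec_sl2_modes_at_weight_py; infer_instance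

-- ===== CLAIM (what is proved, stated in full; the proofs are below) =====
def Claim_equal_sl2_modes_at_weight_py : Prop := ∀ (h_ : Int), Dom_sl2_modes_at_weight_py h_ → Spec_sl2_modes_at_weight_py h_ (sl2_modes_at_weight_py h_)

-- ===== LEMMAS AND PROOFS =====

-- total level of a state
def pvSumL (s : List (Int × Int)) : Int := (s.map Prod.snd).sum

-- the invariant of A's recursion: pairs weakly decreasing under the bound
-- (bl, bg), levels ≥ 1, generators in 0..2
def pvChain : Int → Int → List (Int × Int) → Prop
  | _, _, [] => True
  | bl, bg, (g, l) :: rest =>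
      (1 ≤ l ∧ 0 ≤ g ∧ g ≤ 2 ∧ (l < bl ∨ (l = bl ∧ g ≤ bg))) ∧ pvChain l g rest

-- the invariant of B's partition generator
def pvParts : Int → List Int → Prop
  | _, [] => True
  | maxp, l :: rest => (1 ≤ l ∧ l ≤ maxp) ∧ pvParts l rest

-- the invariant of B's coloring pass
def pvGDec : Int → Int → List (Int × Int) → Prop
  | _, _, [] => True
  | pl, pg, (g, l) :: rest => (0 ≤ g ∧ g ≤ (if l = pl then pg else 2)) ∧ pvGDec l g rest

lemma pvChain_sum_nonneg (s : List (Int × Int)) :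
    ∀ bl bg, pvChain bl bg s → 0 ≤ pvSumL s := by
  induction s with
  | nil => intro _ _ _; simp [pvSumL]
  | cons p t ih =>
    obtain ⟨g, l⟩ := p
    intro bl bg hc
    obtain ⟨⟨h1, _⟩, hrest⟩ := hc
    have := ih l g hrest
    simp only [pvSumL, List.map_cons, List.sum_cons] at *
    omega

lemma pvParts_sum_nonneg (p : List Int) : ∀ maxp, pvParts maxp p → 0 ≤ p.sum := by
  induction p with
  | nil => intro _ _; simp
  | cons l t ih =>
    intro maxp hc
    obtain ⟨⟨h1, _⟩, hrest⟩ := hc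
    have := ih l hrest
    simp only [List.sum_cons]
    omega

lemma pvRange_pairwise_gt_aux : ∀ (n : Nat) (a b : Int), (a - b).toNat ≤ n →
    (PySem.List.pyRange a b (-1)).Pairwise (fun x y => y < x) := by
  intro n
  induction n with
  | zero =>
    intro a b hn
    rw [PySem.List.pyRange_neg_one_eq_nil (by omega)]
    exact List.Pairwise.nil
  | succ n ih =>
    intro a b hn
    by_cases hab : a ≤ b
    · rw [PySem.List.pyRange_neg_one_eq_nil hab]; exact List.Pairwise.nil
    · rw [PySem.List.pyRange_neg_one_cons (by omega)]
      refine List.Pairwise.cons ?_ (ih (a - 1) b (by omega))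
      intro y hy
      have := PySem.List.mem_pyRange_neg_one.mp hy
      omega

lemma pvRange_pairwise_gt (a b : Int) :
    (PySem.List.pyRange a b (-1)).Pairwise (fun x y => y < x) :=
  pvRange_pairwise_gt_aux (a - b).toNat a b le_rfl

lemma pvRange_nodup (a b : Int) : (PySem.List.pyRange a b (-1)).Nodup :=
  (pvRange_pairwise_gt a b).imp (fun {x y} h => by omega)

-- nodup of a flatMap whose blocks are nodup and pairwise disjoint
lemma pv_nodup_flatMap {α β : Type} (xs : List α) (f : α → List β) (h1 : xs.Nodup)
    (h2 : ∀ x ∈ xs, (f x).Nodup)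
    (h3 : ∀ x ∈ xs, ∀ y ∈ xs, x ≠ y → ∀ b ∈ f x, b ∉ f y) : (xs.flatMap f).Nodup := by
  rw [List.flatMap_def, List.nodup_flatten]
  constructor
  · intro l hl
    obtain ⟨x, hx, rfl⟩ := List.mem_map.mp hl
    exact h2 x hx
  · rw [List.pairwise_map]
    exact h1.imp_of_mem (fun {x y} hx hy hne => fun b hbx hby => h3 x hx y hy hne b hbx hby)

-- pairwise of a flatMap: blocks pairwise, cross-blocks pairwise
lemma pv_pairwise_flatMap {α β : Type} (xs : List α) (f : α → List β) (R : β → β → Prop)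
    (h1 : ∀ x ∈ xs, (f x).Pairwise R)
    (h2 : xs.Pairwise (fun a b => ∀ u ∈ f a, ∀ v ∈ f b, R u v)) : (xs.flatMap f).Pairwise R := by
  rw [List.flatMap_def, List.pairwise_flatten]
  refine ⟨?_, ?_⟩
  · intro l hl
    obtain ⟨x, hx, rfl⟩ := List.mem_map.mp hl
    exact h1 x hx
  · rw [List.pairwise_map]; exact h2

-- A's recursion unfolded to a plain flatMap
lemma pvGenStates_eq (rem bl bg : Int) (h : rem ≠ 0) :
    pvGenStates rem bl bg =
      (PySem.List.pyRange (min rem bl) 0 (-1)).flatMap (fun level =>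
        (PySem.List.pyRange (if level = bl then bg else 2) (-1) (-1)).flatMap (fun gen =>
          (pvGenStates (rem - level) level gen).map ((gen, level) :: ·))) := by
  rw [pvGenStates, if_neg h, List.flatMap_def]
  congr 1
  exact List.attach_map_val (l := PySem.List.pyRange (min rem bl) 0 (-1))
    (f := fun level => (PySem.List.pyRange (if level = bl then bg else 2) (-1) (-1)).flatMap
      (fun gen => (pvGenStates (rem - level) level gen).map ((gen, level) :: ·)))

-- B's partition recursion unfolded to a plain flatMap
lemma pvPartitionsB_eq (n maxp : Int) (h : n ≠ 0) :
    pvPartitionsB n maxp =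
      (PySem.List.pyRange (min n maxp) 0 (-1)).flatMap (fun p =>
        (pvPartitionsB (n - p) p).map (p :: ·)) := by
  rw [pvPartitionsB, if_neg h, List.flatMap_def, List.flatMap_def]
  congr 1
  exact List.attach_map_val (l := PySem.List.pyRange (min n maxp) 0 (-1))
    (f := fun p => (pvPartitionsB (n - p) p).map (p :: ·))

-- membership characterisation of A's list, on the empty side
lemma pvA_mem_nonpos (rem bl bg : Int) (hr : rem ≤ 0) (s : List (Int × Int)) :
    s ∈ pvGenStates rem bl bg ↔ (pvChain bl bg s ∧ pvSumL s = rem) := by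
  by_cases h0 : rem = 0
  · subst h0
    rw [pvGenStates, if_pos rfl]
    constructor
    · intro hs
      simp only [List.mem_singleton] at hs
      subst hs
      exact ⟨trivial, by simp [pvSumL]⟩
    · rintro ⟨hc, hs⟩
      cases s with
      | nil => simp
      | cons p t =>
        obtain ⟨g, l⟩ := p
        obtain ⟨⟨h1, _⟩, ht⟩ := hc
        have := pvChain_sum_nonneg t l g ht
        simp only [pvSumL, List.map_cons, List.sum_cons] at hs this
        omega
  · rw [pvGenStates_eq _ _ _ h0,
      PySem.List.pyRange_neg_one_eq_nil (by omega : min rem bl ≤ 0), List.flatMap_nil]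
    constructor
    · intro hs; exact absurd hs (List.not_mem_nil)
    · rintro ⟨hc, hs⟩
      have := pvChain_sum_nonneg s bl bg hc
      omega

-- membership characterisation of A's list
lemma pvA_mem : ∀ (n : Nat) (rem bl bg : Int), rem.toNat ≤ n → bg ≤ 2 →
    ∀ s, s ∈ pvGenStates rem bl bg ↔ (pvChain bl bg s ∧ pvSumL s = rem) := by
  intro n
  induction n with
  | zero =>
    intro rem bl bg hn _ s
    exact pvA_mem_nonpos rem bl bg (by omega) s
  | succ n ih =>
    intro rem bl bg hn hbg s
    by_cases hr : rem ≤ 0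
    · exact pvA_mem_nonpos rem bl bg hr s
    · rw [pvGenStates_eq _ _ _ (by omega)]
      simp only [List.mem_flatMap, List.mem_map, PySem.List.mem_pyRange_neg_one]
      constructor
      · rintro ⟨level, ⟨hl0, hlmin⟩, gen, ⟨hg0, hgmax⟩, r, hrm, rfl⟩
        have hgen2 : gen ≤ 2 := by split_ifs at hgmax <;> omega
        have hmem := (ih (rem - level) level gen (by omega) hgen2 r).mp hrm
        have hsum := hmem.2
        simp only [pvChain, pvSumL, List.map_cons, List.sum_cons]
        simp only [pvSumL] at hsum
        refine ⟨⟨⟨by omega, by omega, hgen2, ?_⟩, hmem.1⟩, by omega⟩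
        by_cases he : level = bl
        · rw [if_pos he] at hgmax; exact Or.inr ⟨he, hgmax⟩
        · exact Or.inl (by omega)
      · rintro ⟨hc, hs⟩
        cases s with
        | nil =>
          simp only [pvSumL, List.map_nil, List.sum_nil] at hs
          omega
        | cons p t =>
          obtain ⟨g, l⟩ := p
          obtain ⟨⟨h1, h0, h2, hb⟩, ht⟩ := hc
          have htn := pvChain_sum_nonneg t l g ht
          simp only [pvSumL, List.map_cons, List.sum_cons] at hs
          simp only [pvSumL] at htn
          have hlb : l ≤ bl := by rcases hb with hb | hb <;> omega
          refine ⟨l, ⟨by omega, by omega⟩, g, ⟨by omega, ?_⟩, t, ?_, rfl⟩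
          · split_ifs with he
            · subst he; rcases hb with hb | hb <;> omega
            · omega
          · exact (ih (rem - l) l g (by omega) h2 t).mpr ⟨ht, by simp only [pvSumL]; omega⟩

lemma pvKeyB_cons (g l : Int) (r : List (Int × Int)) :
    pvKeyB ((g, l) :: r) = l :: g :: pvKeyB r := by
  simp [pvKeyB]

lemma pvKeyB_lt (g1 l1 g2 l2 : Int) (r1 r2 : List (Int × Int))
    (h : l2 < l1 ∨ (l2 = l1 ∧ (g2 < g1 ∨ (g2 = g1 ∧ pvKeyB r2 < pvKeyB r1)))) :
    pvKeyB ((g2, l2) :: r2) < pvKeyB ((g1, l1) :: r1) := by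
  rw [pvKeyB_cons, pvKeyB_cons, List.cons_lt_cons_iff]
  rcases h with h | ⟨he, h⟩
  · exact Or.inl h
  · exact Or.inr ⟨he, by rw [List.cons_lt_cons_iff]; exact h⟩

-- every element of A's level-`level` block starts with a pair at that level
lemma pvA_block_shape (rem level gbound : Int) (a : List (Int × Int))
    (ha : a ∈ (PySem.List.pyRange gbound (-1) (-1)).flatMap (fun gen =>
        (pvGenStates (rem - level) level gen).map ((gen, level) :: ·))) :
    ∃ g r, a = (g, level) :: r := by
  simp only [List.mem_flatMap, List.mem_map] at ha
  obtain ⟨gen, _, r, _, rfl⟩ := ha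
  exact ⟨gen, r, rfl⟩

-- A's list is strictly descending in the sort key
lemma pvA_pairwise : ∀ (n : Nat) (rem bl bg : Int), rem.toNat ≤ n →
    (pvGenStates rem bl bg).Pairwise (fun a b => pvKeyB b < pvKeyB a) := by
  intro n
  induction n with
  | zero =>
    intro rem bl bg hn
    by_cases h0 : rem = 0
    · subst h0; rw [pvGenStates, if_pos rfl]; simp
    · rw [pvGenStates_eq _ _ _ h0,
        PySem.List.pyRange_neg_one_eq_nil (by omega : min rem bl ≤ 0), List.flatMap_nil]
      exact List.Pairwise.nil
  | succ n ih =>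
    intro rem bl bg hn
    by_cases h0 : rem = 0
    · subst h0; rw [pvGenStates, if_pos rfl]; simp
    · by_cases hr : rem ≤ 0
      · rw [pvGenStates_eq _ _ _ h0,
          PySem.List.pyRange_neg_one_eq_nil (by omega : min rem bl ≤ 0), List.flatMap_nil]
        exact List.Pairwise.nil
      · rw [pvGenStates_eq _ _ _ h0]
        refine pv_pairwise_flatMap _ _ _ ?_ ?_
        · -- one level block
          intro level hlevel
          refine pv_pairwise_flatMap _ _ _ ?_ ?_
          · -- one generator slot
            intro gen _
            rw [List.pairwise_map]
            have hlv := PySem.List.mem_pyRange_neg_one.mp hlevel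
            refine (ih (rem - level) level gen (by omega)).imp ?_
            intro r1 r2 hlt
            exact pvKeyB_lt gen level gen level r1 r2 (Or.inr ⟨rfl, Or.inr ⟨rfl, hlt⟩⟩)
          · -- across generators, descending
            refine (pvRange_pairwise_gt _ _).imp_of_mem ?_
            intro g1 g2 _ _ hgt u hu v hv
            simp only [List.mem_map] at hu hv
            obtain ⟨r1, _, rfl⟩ := hu
            obtain ⟨r2, _, rfl⟩ := hv
            exact pvKeyB_lt g1 level g2 level r1 r2 (Or.inr ⟨rfl, Or.inl hgt⟩)
        · -- across levels, descending
          refine (pvRange_pairwise_gt _ _).imp_of_mem ?_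
          intro l1 l2 _ _ hgt u hu v hv
          obtain ⟨g1, r1, rfl⟩ := pvA_block_shape rem l1 _ u hu
          obtain ⟨g2, r2, rfl⟩ := pvA_block_shape rem l2 _ v hv
          exact pvKeyB_lt g1 l1 g2 l2 r1 r2 (Or.inl hgt)

lemma pvA_nodup (rem bl bg : Int) : (pvGenStates rem bl bg).Nodup :=
  (pvA_pairwise rem.toNat rem bl bg le_rfl).imp
    (fun {a b} h => fun he => by subst he; exact absurd h (lt_irrefl _))

-- membership characterisation of B's partition generator, empty side
lemma pvPart_mem_nonpos (m maxp : Int) (hm : m ≤ 0) (p : List Int) :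
    p ∈ pvPartitionsB m maxp ↔ (pvParts maxp p ∧ p.sum = m) := by
  by_cases h0 : m = 0
  · subst h0
    rw [pvPartitionsB, if_pos rfl]
    constructor
    · intro hp
      simp only [List.mem_singleton] at hp
      subst hp
      exact ⟨trivial, by simp⟩
    · rintro ⟨hc, hs⟩
      cases p with
      | nil => simp
      | cons l t =>
        obtain ⟨⟨h1, _⟩, ht⟩ := hc
        have := pvParts_sum_nonneg t l ht
        simp only [List.sum_cons] at hs
        omega
  · rw [pvPartitionsB_eq _ _ h0,
      PySem.List.pyRange_neg_one_eq_nil (by omega : min m maxp ≤ 0), List.flatMap_nil]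
    constructor
    · intro hp; exact absurd hp (List.not_mem_nil)
    · rintro ⟨hc, hs⟩
      have := pvParts_sum_nonneg p maxp hc
      omega

-- membership characterisation of B's partition generator
lemma pvPart_mem : ∀ (n : Nat) (m maxp : Int), m.toNat ≤ n →
    ∀ p, p ∈ pvPartitionsB m maxp ↔ (pvParts maxp p ∧ p.sum = m) := by
  intro n
  induction n with
  | zero =>
    intro m maxp hn p
    exact pvPart_mem_nonpos m maxp (by omega) p
  | succ n ih =>
    intro m maxp hn p
    by_cases hm : m ≤ 0
    · exact pvPart_mem_nonpos m maxp hm p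
    · rw [pvPartitionsB_eq _ _ (by omega)]
      simp only [List.mem_flatMap, List.mem_map, PySem.List.mem_pyRange_neg_one]
      constructor
      · rintro ⟨l, ⟨hl0, hlmin⟩, t, htm, rfl⟩
        have hmem := (ih (m - l) l (by omega) t).mp htm
        refine ⟨⟨⟨by omega, by omega⟩, hmem.1⟩, ?_⟩
        simp only [List.sum_cons]
        omega
      · rintro ⟨hc, hs⟩
        cases p with
        | nil => simp at hs; omega
        | cons l t =>
          obtain ⟨⟨h1, hle⟩, ht⟩ := hc
          have htn := pvParts_sum_nonneg t l ht
          simp only [List.sum_cons] at hs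
          exact ⟨l, ⟨by omega, by omega⟩, t,
            (ih (m - l) l (by omega) t).mpr ⟨ht, by omega⟩, rfl⟩

lemma pvPart_nodup : ∀ (n : Nat) (m maxp : Int), m.toNat ≤ n →
    (pvPartitionsB m maxp).Nodup := by
  intro n
  induction n with
  | zero =>
    intro m maxp hn
    by_cases h0 : m = 0
    · subst h0; rw [pvPartitionsB, if_pos rfl]; simp
    · rw [pvPartitionsB_eq _ _ h0,
        PySem.List.pyRange_neg_one_eq_nil (by omega : min m maxp ≤ 0), List.flatMap_nil]
      exact List.nodup_nil
  | succ n ih =>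
    intro m maxp hn
    by_cases h0 : m = 0
    · subst h0; rw [pvPartitionsB, if_pos rfl]; simp
    · by_cases hm : m ≤ 0
      · rw [pvPartitionsB_eq _ _ h0,
          PySem.List.pyRange_neg_one_eq_nil (by omega : min m maxp ≤ 0), List.flatMap_nil]
        exact List.nodup_nil
      · rw [pvPartitionsB_eq _ _ h0]
        refine pv_nodup_flatMap _ _ (pvRange_nodup _ _) ?_ ?_
        · intro l hl
          have := PySem.List.mem_pyRange_neg_one.mp hl
          exact (ih (m - l) l (by omega)).map List.cons_injective
        · intro l1 _ l2 _ hne b hb1 hb2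
          simp only [List.mem_map] at hb1 hb2
          obtain ⟨t1, _, rfl⟩ := hb1
          obtain ⟨t2, _, he⟩ := hb2
          exact hne (by injection he with h _; omega)

-- membership characterisation of B's coloring pass
lemma pvColorize_mem : ∀ (levels : List Int) (pl pg : Int) (s : List (Int × Int)),
    s ∈ pvColorize levels pl pg ↔ (s.map Prod.snd = levels ∧ pvGDec pl pg s) := by
  intro levels
  induction levels with
  | nil =>
    intro pl pg s
    rw [pvColorize]
    simp only [List.mem_singleton, List.map_eq_nil_iff]
    constructor
    · rintro rfl; exact ⟨rfl, trivial⟩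
    · rintro ⟨rfl, _⟩; rfl
  | cons l rest ih =>
    intro pl pg s
    rw [pvColorize]
    simp only [List.mem_flatMap, List.mem_map, PySem.List.mem_pyRange_neg_one]
    constructor
    · rintro ⟨g, ⟨hg0, hgmax⟩, r, hr, rfl⟩
      have hmem := (ih l g r).mp hr
      exact ⟨by simp [hmem.1], ⟨by omega, hgmax⟩, hmem.2⟩
    · rintro ⟨hmap, hd⟩
      cases s with
      | nil => simp at hmap
      | cons p t =>
        obtain ⟨g, l'⟩ := p
        simp only [List.map_cons, List.cons.injEq] at hmap
        obtain ⟨rfl, hmt⟩ := hmap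
        obtain ⟨⟨h0, hg⟩, ht⟩ := hd
        exact ⟨g, ⟨by omega, hg⟩, t, (ih l' g t).mpr ⟨hmt, ht⟩, rfl⟩

lemma pvColorize_nodup : ∀ (levels : List Int) (pl pg : Int),
    (pvColorize levels pl pg).Nodup := by
  intro levels
  induction levels with
  | nil => intro pl pg; rw [pvColorize]; simp
  | cons l rest ih =>
    intro pl pg
    rw [pvColorize]
    refine pv_nodup_flatMap _ _ (pvRange_nodup _ _) ?_ ?_
    · intro g _
      exact (ih l g).map List.cons_injective
    · intro g1 _ g2 _ hne b hb1 hb2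
      simp only [List.mem_map] at hb1 hb2
      obtain ⟨t1, _, rfl⟩ := hb1
      obtain ⟨t2, _, he⟩ := hb2
      refine hne ?_
      injection he with h _
      injection h with h _
      omega

-- pvGDec with budget 2 ignores the previous level
lemma pvGDec_two (s : List (Int × Int)) (pl pl' : Int) :
    pvGDec pl 2 s ↔ pvGDec pl' 2 s := by
  cases s with
  | nil => exact Iff.rfl
  | cons p t =>
    obtain ⟨g, l⟩ := p
    simp only [pvGDec]
    constructor <;>
      (rintro ⟨⟨h0, h2⟩, ht⟩; refine ⟨⟨h0, ?_⟩, ht⟩; split_ifs at h2 ⊢ <;> omega)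

-- the two invariants describe the same states
lemma pvChain_iff (s : List (Int × Int)) :
    ∀ pl pg, pg ≤ 2 → (pvChain pl pg s ↔ (pvParts pl (s.map Prod.snd) ∧ pvGDec pl pg s)) := by
  induction s with
  | nil => intro _ _ _; simp [pvChain, pvParts, pvGDec]
  | cons p t ih =>
    obtain ⟨g, l⟩ := p
    intro pl pg hpg
    simp only [pvChain, pvParts, pvGDec, List.map_cons]
    constructor
    · rintro ⟨⟨h1, h0, h2, hb⟩, hc⟩
      rw [ih l g h2] at hc
      refine ⟨⟨⟨h1, by rcases hb with hb | hb <;> omega⟩, hc.1⟩, ⟨h0, ?_⟩, hc.2⟩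
      split_ifs with hq
      · subst hq; rcases hb with hb | hb <;> omega
      · omega
    · rintro ⟨⟨⟨h1, hle⟩, hp⟩, ⟨h0, hg⟩, hd⟩
      have hg2 : g ≤ 2 := by split_ifs at hg <;> omega
      rw [ih l g hg2]
      by_cases he : l = pl
      · rw [if_pos he] at hg
        exact ⟨⟨h1, h0, hg2, Or.inr ⟨he, hg⟩⟩, hp, hd⟩
      · rw [if_neg he] at hg
        exact ⟨⟨h1, h0, hg2, Or.inl (by omega)⟩, hp, hd⟩

-- membership characterisation of B's pre-sort list
lemma pvB_mem (h : Int) (s : List (Int × Int)) :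
    s ∈ (pvPartitionsB h h).flatMap (fun part => pvColorize part 0 2) ↔
      (pvChain h 2 s ∧ pvSumL s = h) := by
  simp only [List.mem_flatMap]
  constructor
  · rintro ⟨part, hpart, hs⟩
    obtain ⟨hparts, hsum⟩ := (pvPart_mem h.toNat h h le_rfl part).mp hpart
    obtain ⟨hmap, hd⟩ := (pvColorize_mem part 0 2 s).mp hs
    subst hmap
    refine ⟨(pvChain_iff s h 2 le_rfl).mpr ⟨hparts, (pvGDec_two s 0 h).mp hd⟩, ?_⟩
    simpa [pvSumL] using hsum
  · rintro ⟨hc, hs⟩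
    obtain ⟨hparts, hd⟩ := (pvChain_iff s h 2 le_rfl).mp hc
    exact ⟨s.map Prod.snd,
      (pvPart_mem h.toNat h h le_rfl _).mpr ⟨hparts, by simpa [pvSumL] using hs⟩,
      (pvColorize_mem _ 0 2 s).mpr ⟨rfl, (pvGDec_two s h 0).mp hd⟩⟩

lemma pvB_nodup (h : Int) :
    ((pvPartitionsB h h).flatMap (fun part => pvColorize part 0 2)).Nodup := by
  refine pv_nodup_flatMap _ _ (pvPart_nodup h.toNat h h le_rfl) ?_ ?_
  · intro part _
    exact pvColorize_nodup part 0 2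
  · intro p1 _ p2 _ hne b hb1 hb2
    have h1 := ((pvColorize_mem p1 0 2 b).mp hb1).1
    have h2 := ((pvColorize_mem p2 0 2 b).mp hb2).1
    exact hne (h1 ▸ h2)

-- the two DecidableLT instances on the key type decide the same order,
-- so the port's sort equals the sort under the LinearOrder instance
lemma pvSorted_inst (h_ : Int) :
    sl2_modes_at_weight_py_alt h_ =
      @PySem.List.sorted _ _ List.instLinearOrder.toLT LinearOrder.toDecidableLT
        ((pvPartitionsB h_ h_).flatMap (fun part => pvColorize part 0 2)) pvKeyB true := by
  unfold sl2_modes_at_weight_py_alt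
  rw [PySem.List.sorted_rev_eq_foldl_insertBy,
    @PySem.List.sorted_rev_eq_foldl_insertBy _ _ List.instLinearOrder.toLT
      LinearOrder.toDecidableLT _ pvKeyB]
  congr 1
  funext acc x
  congr 1
  funext a b
  exact decide_eq_decide.mpr Iff.rfl

-- ===== VERDICT (by name: the statement is the Claim_ definition above) =====
theorem sl2_modes_at_weight_py_spec : Claim_equal_sl2_modes_at_weight_py := by
  intro h_ _
  unfold Spec_sl2_modes_at_weight_py sl2_modes_at_weight_py
  rw [pvSorted_inst]
  refine (PySem.List.sorted_rev_eq_of_perm_of_pairwise_gt _ _ pvKeyB ?_ ?_).symm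
  · refine (List.perm_ext_iff_of_nodup (pvA_nodup _ _ _) (pvB_nodup _)).mpr ?_
    intro s
    rw [pvA_mem h_.toNat h_ h_ 2 le_rfl (by omega), pvB_mem]
  · exact pvA_pairwise h_.toNat h_ h_ 2 le_rfl
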